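-- pv_equiv track=rewrite | github.com/Aaalice233/ComfyUI-Danbooru-Gallery | py/prompt_cleaning_maid/prompt_cleaning_maid.py | _escape_brackets_in_tag_custom
-- ===== SOURCE A (Python) =====
-- def _escape_brackets_in_tag_custom(tag: str) -> str:
--     """在标签中智能转义括号 - 定制版"""
--     result = []
--     i = 0
--
--     while i < len(tag):
--         if tag[i] == '(':
--             # 查找对应的右括号
--             bracket_depth = 1
--             j = i + 1
--             content_start = i + 1
--
--             while j < len(tag) and bracket_depth > 0:
--                 if tag[j] == '(':
--                     bracket_depth += 1
--                 elif tag[j] == ')':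
--                     bracket_depth -= 1
--                 elif tag[j] == '\\':
--                     j += 1  # 跳过已转义字符
--                 j += 1
--
--             if bracket_depth == 0:  # 找到匹配的右括号
--                 bracket_content = tag[content_start:j-1]
--
--                 # 检查括号前面的字符
--                 has_word_before = False
--                 if i > 0:
--                     # 检查前面是否有非空白字符
--                     for k in range(i-1, -1, -1):
--                         if tag[k] not in [' ', '\t', '\n']:
--                             has_word_before = True
--                             break
--
--                 # 情况1: 前面有单词
--                 if has_word_before:
--                     # 检查括号内容是否包含权重语法或多标签语法
--                     # 如果包含，说明这是漏逗号的情况，需要分成两个标签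
--                     if ':' in bracket_content or ',' in bracket_content:
--                         # 漏逗号：添加逗号分隔
--                         result.append(', ')
--                         result.append(f'({bracket_content})')
--                     else:
--                         # 正常的tag(content)格式：需要转义（系列名称等）
--                         # 统一处理空格插入：所有括号前都检查是否需要空格
--                         if tag[i-1] not in [' ', '\t', '\n']:
--                             result.append(' ')
--                         result.append(f'\\({bracket_content}\\)')
--                     i = j
--
--                 # 情况2: 前面没有单词（整个标签就是括号）
--                 else:
--                     if ':' in bracket_content:
--                         # 权重语法：(content) - 保持括号，包括多标签权重语法
--                         result.append(f'({bracket_content})')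
--                         i = j
--                     else:
--                         # 普通内容：移除括号，只保留内容
--                         result.append(bracket_content)
--                         i = j
--             else:
--                 # 不匹配的左括号，保持原样
--                 result.append(tag[i])
--                 i += 1
--         else:
--             result.append(tag[i])
--             i += 1
--
--     return ''.join(result)
-- ===== SOURCE B (Python) =====
-- def _escape_brackets_in_tag_custom(tag: str) -> str:
--     """Two-pass rewrite: tokenize into literal chars / matched bracket groups,
--     then emit with an incrementally maintained has-word flag and previous char."""
--     WS = (' ', '\t', '\n')
--     n = len(tag)
--
--     # pass 1: tokenize
--     tokens = []
--     i = 0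
--     while i < n:
--         c = tag[i]
--         if c == '(':
--             depth = 1
--             j = i + 1
--             while j < n and depth > 0:
--                 cj = tag[j]
--                 if cj == '(':
--                     depth += 1
--                 elif cj == ')':
--                     depth -= 1
--                 elif cj == '\\':
--                     j += 1
--                 j += 1
--             if depth == 0:
--                 tokens.append((True, tag[i + 1:j - 1]))
--                 i = j
--                 continue
--         tokens.append((False, c))
--         i += 1
--
--     # pass 2: emit
--     out = []
--     has_word = False
--     prev = None
--     for is_group, s in tokens:
--         if not is_group:
--             out.append(s)
--             has_word = has_word or s not in WS
--             prev = s
--         else: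
--             if has_word:
--                 if ':' in s or ',' in s:
--                     out.append(', (' + s + ')')
--                 else:
--                     if prev not in WS:
--                         out.append(' ')
--                     out.append('\\(' + s + '\\)')
--             else:
--                 if ':' in s:
--                     out.append('(' + s + ')')
--                 else:
--                     out.append(s)
--             has_word = True
--             prev = ')'
--     return ''.join(out)
-- ===== Notes on version B (the rewrite author's own statement) =====
-- stated objective: alternative
-- what changed: A's single loop that re-runs a backward whitespace scan before every matched bracket group is replaced by a tokenize-then-emit decomposition: pass 1 builds a list of literal-char / matched-group tokens, pass 2 emits output while carrying the has-word flag and the previous original character incrementally, so the per-group backward scan disappears.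
import Mathlib
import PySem

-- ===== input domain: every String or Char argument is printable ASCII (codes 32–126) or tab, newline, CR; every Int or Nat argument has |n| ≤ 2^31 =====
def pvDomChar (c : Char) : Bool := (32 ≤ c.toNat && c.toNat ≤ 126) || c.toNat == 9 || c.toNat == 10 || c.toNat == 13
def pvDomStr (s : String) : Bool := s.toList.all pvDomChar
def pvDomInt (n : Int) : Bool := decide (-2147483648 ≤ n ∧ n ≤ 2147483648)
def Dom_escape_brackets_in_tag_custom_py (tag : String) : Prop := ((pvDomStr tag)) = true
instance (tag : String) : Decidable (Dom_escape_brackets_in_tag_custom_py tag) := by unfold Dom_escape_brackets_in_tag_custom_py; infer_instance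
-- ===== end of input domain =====

-- B replaces A's one-pass loop (which re-runs a backward whitespace scan before every
-- matched bracket group) by a tokenize-then-emit decomposition: pass 1 builds a list of
-- literal-char / matched-group tokens, pass 2 emits output carrying the has-word flag and
-- the previous original character incrementally; objective: alternative decomposition.


-- ===== PORT A =====

def pvIsWS (c : Char) : Bool := c = ' ' || c = '\t' || c = '\n'

-- the inner `while j < len(tag) and bracket_depth > 0` scan, shared verbatim by A and Source B,
-- expressed over the remaining characters tag[j:]: returns (chars consumed, final depth)
def pvFindClose (cs : List Char) (depth : Nat) : Nat × Nat :=
  if depth = 0 then (0, depth)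
  else match cs with
  | [] => (0, depth)
  | c :: rest =>
    if c = '(' then ((pvFindClose rest (depth+1)).1 + 1, (pvFindClose rest (depth+1)).2)
    else if c = ')' then ((pvFindClose rest (depth-1)).1 + 1, (pvFindClose rest (depth-1)).2)
    else if c = '\\' then
      match rest with
      | [] => (2, depth)            -- j += 2 runs past the end; loop then exits
      | _ :: rest2 => ((pvFindClose rest2 depth).1 + 2, (pvFindClose rest2 depth).2)
    else ((pvFindClose rest depth).1 + 1, (pvFindClose rest depth).2)

-- A's `for k in range(i-1,-1,-1): if tag[k] not in [' ','\t','\n']: has_word_before = True; break`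
def pvHasWordBack (s : List Char) (k : Nat) : Bool :=
  if !pvIsWS (s.getD k ' ') then true
  else match k with
  | 0 => false
  | k' + 1 => pvHasWordBack s k'

-- bracket_content = tag[i+1 : j-1] where j = i+1+n; exact since 0 ≤ i+1 and j-1 ≤ len
def pvContent (s : List Char) (i n : Nat) : List Char :=
  (s.drop (i+1)).take (n - 1)

-- A's main `while i < len(tag)` loop, producing the concatenation of the pieces A appends
-- to `result` from position i on (Python's j is i+1+n with n the consumed count)
def pvALoop (s : List Char) (i : Nat) : List Char :=
  if _hi : i < s.length then
    if s.getD i ' ' = '(' then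
      if (pvFindClose (s.drop (i+1)) 1).2 = 0 then
        (if (if 0 < i then pvHasWordBack s (i-1) else false) then
          if (pvContent s i (pvFindClose (s.drop (i+1)) 1).1).contains ':'
              || (pvContent s i (pvFindClose (s.drop (i+1)) 1).1).contains ',' then
            ", (".toList ++ pvContent s i (pvFindClose (s.drop (i+1)) 1).1 ++ [')']
          else
            (if !pvIsWS (s.getD (i-1) ' ') then [' '] else []) ++
              (['\\','('] ++ pvContent s i (pvFindClose (s.drop (i+1)) 1).1 ++ ['\\',')'])
        else
          if (pvContent s i (pvFindClose (s.drop (i+1)) 1).1).contains ':' then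
            '(' :: pvContent s i (pvFindClose (s.drop (i+1)) 1).1 ++ [')']
          else pvContent s i (pvFindClose (s.drop (i+1)) 1).1)
          ++ pvALoop s (i + 1 + (pvFindClose (s.drop (i+1)) 1).1)
      else
        s.getD i ' ' :: pvALoop s (i+1)
    else
      s.getD i ' ' :: pvALoop s (i+1)
  else []
termination_by s.length - i
decreasing_by
  · exact Nat.sub_lt_sub_left _hi (Nat.lt_add_right _ (Nat.lt_succ_self i))
  · exact Nat.sub_lt_sub_left _hi (Nat.lt_succ_self i)
  · exact Nat.sub_lt_sub_left _hi (Nat.lt_succ_self i)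

def escape_brackets_in_tag_custom_py (tag : String) : String :=
  String.ofList (pvALoop tag.toList 0)

-- ===== PORT B =====

inductive PvTok
  | lit (c : Char)
  | grp (content : List Char)
deriving DecidableEq, Repr

-- Source B pass 1: one token per literal character / matched bracket group
def pvTokenize (s : List Char) (i : Nat) : List PvTok :=
  if _hi : i < s.length then
    if s.getD i ' ' = '(' then
      if (pvFindClose (s.drop (i+1)) 1).2 = 0 then
        PvTok.grp (pvContent s i (pvFindClose (s.drop (i+1)) 1).1)
          :: pvTokenize s (i + 1 + (pvFindClose (s.drop (i+1)) 1).1)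
      else
        PvTok.lit '(' :: pvTokenize s (i+1)
    else
      PvTok.lit (s.getD i ' ') :: pvTokenize s (i+1)
  else []
termination_by s.length - i
decreasing_by
  · exact Nat.sub_lt_sub_left _hi (Nat.lt_add_right _ (Nat.lt_succ_self i))
  · exact Nat.sub_lt_sub_left _hi (Nat.lt_succ_self i)
  · exact Nat.sub_lt_sub_left _hi (Nat.lt_succ_self i)

-- Source B pass 2: emit, carrying has_word and the previous original character
def pvEmit : List PvTok → Bool → Option Char → List Char
  | [], _, _ => []
  | PvTok.lit c :: ts, hw, _ => c :: pvEmit ts (hw || !pvIsWS c) (some c)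
  | PvTok.grp cs :: ts, hw, prev =>
    (if hw then
      if cs.contains ':' || cs.contains ',' then ", (".toList ++ cs ++ [')']
      else
        (if (match prev with | some p => !pvIsWS p | none => true) then [' '] else []) ++
          (['\\','('] ++ cs ++ ['\\',')'])
    else
      if cs.contains ':' then '(' :: cs ++ [')']
      else cs) ++ pvEmit ts true (some ')')

def escape_brackets_in_tag_custom_py_alt (tag : String) : String :=
  String.ofList (pvEmit (pvTokenize tag.toList 0) false none)

-- ===== PRECONDITION & SPEC =====
def Spec_escape_brackets_in_tag_custom_py (tag : String) (out : String) : Prop := out = escape_brackets_in_tag_custom_py_alt tag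
instance (tag : String) (out : String) : Decidable (Spec_escape_brackets_in_tag_custom_py tag out) := by unfold Spec_escape_brackets_in_tag_custom_py; infer_instance

-- ===== CLAIM (what is proved, stated in full; the proofs are below) =====
def Claim_equal_escape_brackets_in_tag_custom_py : Prop := ∀ (tag : String), Dom_escape_brackets_in_tag_custom_py tag → Spec_escape_brackets_in_tag_custom_py tag (escape_brackets_in_tag_custom_py tag)

-- ===== LEMMAS AND PROOFS =====

-- a successful close scan consumes ≥ 1 chars, stays inside the list, and ends on a ')'
theorem pvFindClose_spec (cs : List Char) (d : Nat) (hd : 0 < d)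
    (h0 : (pvFindClose cs d).2 = 0) :
    0 < (pvFindClose cs d).1 ∧ (pvFindClose cs d).1 ≤ cs.length ∧
      cs.getD ((pvFindClose cs d).1 - 1) ' ' = ')' := by
  fun_induction pvFindClose cs d with
  | case1 t => exact absurd hd (by omega)
  | case2 d h => simp at h0; omega
  | case3 d h rest ih =>
      have this := ih (by omega) h0
      refine ⟨by omega, by simp; omega, ?_⟩
      have he : (pvFindClose rest (d+1)).1 + 1 - 1 = ((pvFindClose rest (d+1)).1 - 1) + 1 := by omega
      rw [he]
      simpa using this.2.2
  | case4 d h rest h2 ih =>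
      by_cases h1 : d = 1
      · subst h1
        have hz : pvFindClose rest 0 = (0, 0) := by rw [pvFindClose.eq_def]; simp
        rw [show (1:Nat) - 1 = 0 from rfl, hz] at h0 ⊢
        simp
      · have this := ih (by omega) h0
        refine ⟨by omega, by simp; omega, ?_⟩
        have he : (pvFindClose rest (d-1)).1 + 1 - 1 = ((pvFindClose rest (d-1)).1 - 1) + 1 := by omega
        rw [he]
        simpa using this.2.2
  | case5 d h2 h1 h3 => simp at h0; omega
  | case6 d h2 c2 rest2 h1 h3 ih =>
      have this := ih (by omega) h0
      refine ⟨by omega, by simp; omega, ?_⟩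
      have he : (pvFindClose rest2 d).1 + 2 - 1 = ((pvFindClose rest2 d).1 - 1) + 1 + 1 := by omega
      rw [he]
      simpa using this.2.2
  | case7 d h c rest h1 h2 h3 ih =>
      have this := ih (by omega) h0
      refine ⟨by omega, by simp; omega, ?_⟩
      have he : (pvFindClose rest d).1 + 1 - 1 = ((pvFindClose rest d).1 - 1) + 1 := by omega
      rw [he]
      simpa using this.2.2

theorem pvAnyTakeSucc (s : List Char) (i : Nat) (h : i < s.length) :
    (s.take (i+1)).any (fun c => !pvIsWS c)
      = ((s.take i).any (fun c => !pvIsWS c) || !pvIsWS (s.getD i ' ')) := by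
  rw [List.take_add_one, List.any_append, List.getD_eq_getElem s ' ' h,
      List.getElem?_eq_getElem h]
  simp

theorem pvHasWordBack_eq (s : List Char) (k : Nat) (hk : k < s.length) :
    pvHasWordBack s k = (s.take (k+1)).any (fun c => !pvIsWS c) := by
  induction k with
  | zero =>
      rw [pvHasWordBack, pvAnyTakeSucc s 0 hk]
      by_cases h : pvIsWS (s.getD 0 ' ') <;> simp [h, List.getD, Bool.or_comm]
  | succ k ih =>
      rw [pvHasWordBack, pvAnyTakeSucc s (k+1) hk]
      by_cases h : pvIsWS (s.getD (k+1) ' ') <;>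
        simp [h, ih (by omega), List.getD, Bool.or_comm]

theorem pvAnyTakeOfParen (s : List Char) (i j : Nat) (hij : i < j) (hi : i < s.length)
    (hc : s.getD i ' ' = '(') : (s.take j).any (fun c => !pvIsWS c) = true := by
  refine List.any_eq_true.2 ⟨'(', ?_, by decide⟩
  have h1 : (s.take j)[i]? = s[i]? := by rw [List.getElem?_take]; simp [hij]
  have h2 : s[i]? = some '(' := by
    rw [List.getElem?_eq_getElem hi]
    rw [List.getD_eq_getElem s ' ' hi] at hc
    simp [hc]
  exact List.mem_of_getElem? (h1.trans h2)

-- transfer the end-on-')' fact from the dropped suffix back to s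
theorem pvGetDDrop (s : List Char) (m k : Nat) :
    (s.drop m).getD k ' ' = s.getD (m + k) ' ' := by
  simp [List.getD, List.getElem?_drop]

-- main invariant: A's loop from i = B's emitter on the tokens from i, given the running
-- flag equals "any non-whitespace in tag[:i]" and prev is tag[i-1]
theorem pvKey (s : List Char) (i : Nat) :
    ∀ (hw : Bool) (prev : Option Char),
    hw = (s.take i).any (fun c => !pvIsWS c) →
    ((i = 0 ∧ prev = none) ∨ (0 < i ∧ prev = some (s.getD (i-1) ' '))) →
    pvALoop s i = pvEmit (pvTokenize s i) hw prev := by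
  fun_induction pvALoop s i with
  | case1 i hi hc hr ih =>
      intro hw prev hhw hprev
      rw [pvTokenize]
      simp only [hi, reduceDIte, hc, reduceIte, hr, pvEmit]
      have hspec := pvFindClose_spec (s.drop (i+1)) 1 (by omega) hr
      have hlen : (s.drop (i+1)).length = s.length - (i+1) := by simp
      have hA : (if 0 < i then pvHasWordBack s (i - 1) else false) = hw := by
        by_cases h0 : 0 < i
        · rw [if_pos h0, pvHasWordBack_eq s (i-1) (by omega), hhw]
          have he : i - 1 + 1 = i := by omega
          rw [he]
        · rw [if_neg h0, hhw]
          have hz : i = 0 := by omega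
          subst hz
          simp
      congr 1
      · rw [hA]
        cases hw with
        | false => rfl
        | true =>
          have hi0 : 0 < i := by
            by_contra h0
            have hz : i = 0 := by omega
            subst hz
            simp at hhw
          rcases hprev with ⟨h0, _⟩ | ⟨_, hp⟩
          · omega
          · subst hp
            rfl
      · refine ih true (some ')')
          (pvAnyTakeOfParen s i _ (by omega) hi hc).symm (Or.inr ⟨by omega, ?_⟩)
        have he : i + 1 + (pvFindClose (s.drop (i+1)) 1).1 - 1
            = i + 1 + ((pvFindClose (s.drop (i+1)) 1).1 - 1) := by omega
        rw [he, ← pvGetDDrop, hspec.2.2]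
  | case2 i hi hc hr ih =>
      intro hw prev hhw hprev
      rw [pvTokenize]
      simp only [hi, reduceDIte, hc, reduceIte, hr, pvEmit]
      refine congrArg _ ?_
      refine ih _ _ ?_ (Or.inr ⟨by omega, by rw [Nat.add_sub_cancel, hc]⟩)
      rw [pvAnyTakeSucc s i hi, hhw, hc]
  | case3 i hi hc ih =>
      intro hw prev hhw hprev
      rw [pvTokenize]
      simp only [hi, reduceDIte, if_neg hc, pvEmit]
      refine congrArg _ ?_
      refine ih _ _ ?_ (Or.inr ⟨by omega, by rw [Nat.add_sub_cancel]⟩)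
      rw [pvAnyTakeSucc s i hi, hhw]
  | case4 i hi =>
      intro hw prev _ _
      rw [pvTokenize]
      simp [pvEmit, hi]

-- ===== VERDICT (by name: the statement is the Claim_ definition above) =====
theorem escape_brackets_in_tag_custom_py_spec : Claim_equal_escape_brackets_in_tag_custom_py := by
  intro tag _
  unfold Spec_escape_brackets_in_tag_custom_py escape_brackets_in_tag_custom_py
    escape_brackets_in_tag_custom_py_alt
  exact congrArg String.ofList (pvKey tag.toList 0 false none rfl (Or.inl ⟨rfl, rfl⟩))
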